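-- pv_equiv track=rewrite | github.com/KijinKims/ASA_SS2020 | Burrows-Wheeler Transform/BWT.py | runLengthDecoding
-- ===== SOURCE A (Python) =====
-- def runLengthDecoding(T):
--     '''
--     return run length decoding of T
--     '''
--     cnt = ""
--     ret = ""
--
--     for i in range(len(T)):
--         # collect number characters
--         if T[i].isnumeric():
--             cnt = cnt + T[i]
--         # encounter character
--         else:
--             ret = ret + int(cnt) * T[i]
--             cnt = ""
--
--     return ret
-- ===== SOURCE B (Python) =====
-- def runLengthDecoding(T):
--     '''
--     return run length decoding of T
--     '''
--     n = len(T)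
--     ret = ''
--     i = 0
--     while i < n:
--         j = i
--         while j < n and T[j].isnumeric():
--             j += 1
--         if j < n:
--             ret += int(T[i:j]) * T[j]
--         i = j + 1
--     return ret
-- ===== Notes on version B (the rewrite author's own statement) =====
-- stated objective: alternative
-- what changed: B parses with an explicit index: it scans a maximal digit run with an inner while, converts that whole slice at once and emits count*char, instead of A's per-character fold that grows a digit accumulator string character by character.
import Mathlib
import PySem

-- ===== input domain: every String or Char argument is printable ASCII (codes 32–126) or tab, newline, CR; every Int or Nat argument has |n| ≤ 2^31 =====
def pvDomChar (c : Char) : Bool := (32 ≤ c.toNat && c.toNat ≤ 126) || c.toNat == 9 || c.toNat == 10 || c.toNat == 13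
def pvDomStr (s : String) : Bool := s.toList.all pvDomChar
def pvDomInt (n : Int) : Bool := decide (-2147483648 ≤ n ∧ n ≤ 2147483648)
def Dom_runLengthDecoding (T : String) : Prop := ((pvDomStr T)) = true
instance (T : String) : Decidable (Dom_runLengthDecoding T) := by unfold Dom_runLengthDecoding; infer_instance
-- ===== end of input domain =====

-- B decodes with an explicit index scan over maximal digit runs (slice then emit) instead of A's
-- per-character fold with a digit-accumulator string; alternative decomposition, same O(n) cost.


-- ===== PORT A =====
-- Python's str.isnumeric coincides with PySem.Chars.isdigit on the ASCII domain (digits '0'-'9').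
-- int of an empty digit accumulator raises ValueError in Python (PySem.Int.ofChars? = none there);
-- Pre_ excludes exactly those inputs, so '.getD 0' is only a totalisation guard never reached inside Pre_.
def runLengthDecoding (T : String) : String :=
  String.mk ((T.toList.foldl
    (fun (s : List Char × List Char) c =>
      if PySem.Chars.isdigit c then (s.1 ++ [c], s.2)
      else ([], s.2 ++ List.replicate ((PySem.Int.ofChars? s.1).getD 0).toNat c))
    ([], [])).2)

-- ===== PORT B =====
-- Source B's outer while-loop: dropWhile/takeWhile are the inner `while T[j].isnumeric(): j += 1`
-- scan (the maximal digit run T[i:j]); same '.getD 0' totalisation guard as in port A.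
def runLengthDecoding_altGo (cs : List Char) : List Char :=
  match h : cs.dropWhile PySem.Chars.isdigit with
  | [] => []
  | c :: tl =>
      List.replicate ((PySem.Int.ofChars? (cs.takeWhile PySem.Chars.isdigit)).getD 0).toNat c
        ++ runLengthDecoding_altGo tl
termination_by cs.length
decreasing_by
  have hle : (cs.dropWhile PySem.Chars.isdigit).length ≤ cs.length :=
    List.length_dropWhile_le _ _
  rw [h] at hle
  simpa using Nat.lt_of_lt_of_le (Nat.lt_succ_self _) hle

def runLengthDecoding_alt (T : String) : String :=
  String.mk (runLengthDecoding_altGo T.toList)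

-- ===== PRECONDITION & SPEC =====
-- Pre_ : exactly the inputs where Python A returns normally — every non-digit character is
-- immediately preceded by a digit (otherwise A calls int on an empty accumulator and raises ValueError; B raises too).
def Pre_runLengthDecoding (T : String) : Prop :=
  ((match T.toList with
    | [] => true
    | c :: _ => PySem.Chars.isdigit c)
   && (T.toList.zip T.toList.tail).all
        (fun p => PySem.Chars.isdigit p.2 || PySem.Chars.isdigit p.1)) = true
instance (T : String) : Decidable (Pre_runLengthDecoding T) := by
  unfold Pre_runLengthDecoding; infer_instance

def pvWitness_runLengthDecoding : String := "12a3b0c"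

def Spec_runLengthDecoding (T : String) (out : String) : Prop := out = runLengthDecoding_alt T
instance (T : String) (out : String) : Decidable (Spec_runLengthDecoding T out) := by
  unfold Spec_runLengthDecoding; infer_instance

-- ===== CLAIM (what is proved, stated in full; the proofs are below) =====
def Claim_equal_runLengthDecoding : Prop :=
  ∀ (T : String), Dom_runLengthDecoding T → Pre_runLengthDecoding T →
    Spec_runLengthDecoding T (runLengthDecoding T)

-- ===== LEMMAS AND PROOFS =====

theorem dropWhile_all_true {p : Char → Bool} {l : List Char}
    (h : ∀ c ∈ l, p c = true) : l.dropWhile p = [] :=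
  List.dropWhile_eq_nil_iff.mpr h

theorem dropWhile_all_append {p : Char → Bool} {l : List Char} {x : Char} (r : List Char)
    (h : ∀ c ∈ l, p c = true) (hx : p x = false) :
    (l ++ x :: r).dropWhile p = x :: r := by
  rw [List.dropWhile_append, dropWhile_all_true h]
  simp [List.dropWhile, hx]

theorem takeWhile_all_append {p : Char → Bool} {l : List Char} {x : Char} (r : List Char)
    (h : ∀ c ∈ l, p c = true) (hx : p x = false) :
    (l ++ x :: r).takeWhile p = l := by
  induction l with
  | nil => simp [List.takeWhile, hx]
  | cons a t ih =>
      simp only [List.cons_append, List.takeWhile_cons, h a (by simp), if_true]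
      rw [ih (fun c hc => h c (by simp [hc]))]

theorem altGo_step {l : List Char} {x : Char} (r : List Char)
    (h : ∀ c ∈ l, PySem.Chars.isdigit c = true) (hx : PySem.Chars.isdigit x = false) :
    runLengthDecoding_altGo (l ++ x :: r) =
      List.replicate ((PySem.Int.ofChars? l).getD 0).toNat x ++ runLengthDecoding_altGo r := by
  rw [runLengthDecoding_altGo]
  rw [dropWhile_all_append r h hx, takeWhile_all_append r h hx]

theorem altGo_digits {l : List Char}
    (h : ∀ c ∈ l, PySem.Chars.isdigit c = true) : runLengthDecoding_altGo l = [] := by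
  rw [runLengthDecoding_altGo]
  rw [dropWhile_all_true h]

theorem fold_eq_altGo (cs : List Char) : ∀ (cnt ret : List Char),
    (∀ c ∈ cnt, PySem.Chars.isdigit c = true) →
    (cs.foldl
      (fun (s : List Char × List Char) c =>
        if PySem.Chars.isdigit c then (s.1 ++ [c], s.2)
        else ([], s.2 ++ List.replicate ((PySem.Int.ofChars? s.1).getD 0).toNat c))
      (cnt, ret)).2 = ret ++ runLengthDecoding_altGo (cnt ++ cs) := by
  induction cs with
  | nil =>
      intro cnt ret h
      simp [altGo_digits h]
  | cons c cs ih =>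
      intro cnt ret h
      by_cases hc : PySem.Chars.isdigit c = true
      · simp only [List.foldl_cons, hc, if_pos]
        have := ih (cnt ++ [c]) ret (by
          intro d hd
          rcases List.mem_append.mp hd with h1 | h1
          · exact h d h1
          · simp at h1; simpa [h1] using hc)
        simpa [List.append_assoc] using this
      · have hc' : PySem.Chars.isdigit c = false := by simpa using hc
        simp only [List.foldl_cons, hc', Bool.false_eq_true, if_false]
        rw [ih [] _ (by simp)]
        rw [altGo_step cs h hc']
        simp

-- ===== VERDICT (by name: the statement is the Claim_ definition above) =====
theorem runLengthDecoding_spec : Claim_equal_runLengthDecoding := by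
  intro T _ _
  show runLengthDecoding T = runLengthDecoding_alt T
  unfold runLengthDecoding runLengthDecoding_alt
  rw [fold_eq_altGo T.toList [] [] (by simp)]
  simp
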